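-- pv_equiv track=rewrite | github.com/Yuchan45/TP-Grupal-Trebol | generador_csv.py | buscar_ayuda
-- ===== SOURCE A (Python) =====
-- def buscar_ayuda(lista_comentarios):
--     """[Autor: Yuchan]
--        [Ayuda: Recibe una lista de comentarios y devuleve la ayuda en caso de existir]
--     """
--     ayuda = 0
--     for j in range(len(lista_comentarios)):
--         if "ayuda" in lista_comentarios[j].lower():
--             devolver = lista_comentarios[j].lstrip(" ").rstrip("\n")
--             ayuda += 1
--     if ayuda < 1:
--         devolver = "Sin ayuda"
--     return devolver
-- ===== SOURCE B (Python) =====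
-- def buscar_ayuda(lista_comentarios):
--     for c in reversed(lista_comentarios):
--         if "ayuda" in c.lower():
--             return c.lstrip(" ").rstrip("\n")
--     return "Sin ayuda"
-- ===== Notes on version B (the rewrite author's own statement) =====
-- stated objective: simpler
-- what changed: Replaces the full forward scan with a counter and last-write-wins variable by an early-exiting reverse scan that returns the first (i.e. last-in-order) matching comment.
import Mathlib
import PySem

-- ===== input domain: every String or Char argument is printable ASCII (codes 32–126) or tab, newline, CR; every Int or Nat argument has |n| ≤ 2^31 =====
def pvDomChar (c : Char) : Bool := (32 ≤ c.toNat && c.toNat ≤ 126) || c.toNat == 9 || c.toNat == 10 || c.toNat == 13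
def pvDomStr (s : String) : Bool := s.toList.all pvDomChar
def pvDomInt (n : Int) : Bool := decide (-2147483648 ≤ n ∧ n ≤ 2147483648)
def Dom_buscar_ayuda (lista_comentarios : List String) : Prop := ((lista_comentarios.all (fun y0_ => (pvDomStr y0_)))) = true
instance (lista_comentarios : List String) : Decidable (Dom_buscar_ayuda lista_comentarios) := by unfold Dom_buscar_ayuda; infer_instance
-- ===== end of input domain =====

-- B replaces A's forward scan with counter and last-write-wins variable by a simpler early-exiting reverse scan.

-- ===== PORT A =====
-- exact hand port of c.lstrip(" ").rstrip("\n") (PySem has no one-sided stripChars):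
-- drop ' ' on the left, then '\n' on the right
def pyStripAyuda (c : String) : String :=
  String.ofList (((c.toList.dropWhile (· == ' ')).reverse.dropWhile (· == '\n')).reverse)

def buscar_ayuda (lista_comentarios : List String) : String :=
  let st := (PySem.List.pyRange 0 (PySem.List.len lista_comentarios) 1).foldl
    (fun (st : Int × Option String) j =>
      if PySem.Str.isIn "ayuda" (PySem.Str.lower (PySem.List.pyGetD lista_comentarios j ""))
      then (st.1 + 1, some (pyStripAyuda (PySem.List.pyGetD lista_comentarios j "")))
      else st)
    (0, none)
  if st.1 < 1 then "Sin ayuda" else st.2.getD "Sin ayuda"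

-- ===== PORT B =====
def buscarRev : List String → String
  | [] => "Sin ayuda"
  | c :: rest =>
    if PySem.Str.isIn "ayuda" (PySem.Str.lower c) then pyStripAyuda c else buscarRev rest

def buscar_ayuda_alt (lista_comentarios : List String) : String :=
  buscarRev lista_comentarios.reverse

-- ===== PRECONDITION & SPEC =====
def Spec_buscar_ayuda (lista_comentarios : List String) (out : String) : Prop := out = buscar_ayuda_alt lista_comentarios
instance (lista_comentarios : List String) (out : String) : Decidable (Spec_buscar_ayuda lista_comentarios out) := by unfold Spec_buscar_ayuda; infer_instance

-- ===== CLAIM (what is proved, stated in full; the proofs are below) =====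
def Claim_equal_buscar_ayuda : Prop := ∀ (lista_comentarios : List String), Dom_buscar_ayuda lista_comentarios → Spec_buscar_ayuda lista_comentarios (buscar_ayuda lista_comentarios)

-- ===== LEMMAS AND PROOFS =====
def mAyuda (c : String) : Bool := PySem.Str.isIn "ayuda" (PySem.Str.lower c)

def stepA (st : Int × Option String) (c : String) : Int × Option String :=
  if mAyuda c then (st.1 + 1, some (pyStripAyuda c)) else st

theorem buscar_ayuda_eq_fold (L : List String) :
    buscar_ayuda L =
      (let r := L.foldl stepA (0, none)
       if r.1 < 1 then "Sin ayuda" else r.2.getD "Sin ayuda") := by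
  unfold buscar_ayuda
  rw [show (fun (st : Int × Option String) (j : Int) =>
        if PySem.Str.isIn "ayuda" (PySem.Str.lower (PySem.List.pyGetD L j ""))
        then (st.1 + 1, some (pyStripAyuda (PySem.List.pyGetD L j "")))
        else st) = (fun acc j => stepA acc (PySem.List.pyGetD L j "")) from rfl,
      PySem.List.foldl_pyRange_zero_pyGetD L "" stepA ((0 : Int), (none : Option String))]

theorem fold_fst (L : List String) (st : Int × Option String) :
    (L.foldl stepA st).1 = st.1 + (L.countP mAyuda : Int) := by
  induction L generalizing st with
  | nil => simp
  | cons c rest ih =>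
    simp only [List.foldl_cons, ih, stepA, List.countP_cons]
    split_ifs with h
    · simp; omega
    · simp

theorem fold_snd (L : List String) (st : Int × Option String) :
    (L.foldl stepA st).2 =
      (match L.reverse.find? mAyuda with
       | some c => some (pyStripAyuda c)
       | none => st.2) := by
  induction L generalizing st with
  | nil => simp
  | cons c rest ih =>
    simp only [List.foldl_cons, ih, List.reverse_cons, List.find?_append]
    cases h : rest.reverse.find? mAyuda with
    | some d => simp
    | none =>
      by_cases hc : mAyuda c <;> simp [stepA, hc]

theorem buscarRev_eq (xs : List String) :
    buscarRev xs =
      (match xs.find? mAyuda with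
       | some c => pyStripAyuda c
       | none => "Sin ayuda") := by
  induction xs with
  | nil => simp [buscarRev]
  | cons c rest ih =>
    simp only [buscarRev]
    rw [show PySem.Str.isIn "ayuda" (PySem.Str.lower c) = mAyuda c from rfl]
    by_cases hc : mAyuda c
    · rw [if_pos hc, List.find?_cons_of_pos hc]
    · rw [if_neg hc, List.find?_cons_of_neg hc, ih]

-- ===== VERDICT (by name: the statement is the Claim_ definition above) =====
theorem buscar_ayuda_spec : Claim_equal_buscar_ayuda := by
  intro L _
  unfold Spec_buscar_ayuda buscar_ayuda_alt
  rw [buscar_ayuda_eq_fold, buscarRev_eq]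
  simp only [fold_fst, fold_snd]
  cases h : L.reverse.find? mAyuda with
  | none =>
    have hz : L.countP mAyuda = 0 := by
      rw [List.countP_eq_zero]
      intro c hc
      have := List.find?_eq_none.mp h c (by simpa using hc)
      simpa using this
    rw [hz]
    norm_num
  | some c =>
    have hmem : c ∈ L.reverse ∧ mAyuda c = true := ⟨List.mem_of_find?_eq_some h, List.find?_some h⟩
    have hpos : 0 < L.countP mAyuda := by
      rw [List.countP_pos_iff]
      exact ⟨c, by simpa using hmem.1, hmem.2⟩
    have hge : ¬ ((0 : Int) + (L.countP mAyuda : Int) < 1) := by omega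
    rw [if_neg hge]
    rfl
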